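-- pv_equiv track=rewrite | github.com/k-harada/AtCoder | ABC/ABC289/B.py | solve
-- ===== SOURCE A (Python) =====
-- def solve(n, m, a_list):
--     res = []
--     temp = []
--     for p in range(1, n + 1):
--         if p in a_list:
--             temp.append(p)
--         else:
--             res.append(p)
--             while len(temp):
--                 res.append(temp.pop())
--     return " ".join([str(i) for i in res])
-- ===== SOURCE B (Python) =====
-- def solve(n, m, a_list):
--     marked = set(a_list)
--     res = []
--     start = 1
--     for p in range(1, n + 1):
--         if p not in marked:
--             res.extend(range(p, start - 1, -1))
--             start = p + 1
--     return " ".join(map(str, res))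
-- ===== Notes on version B (the rewrite author's own statement) =====
-- stated objective: faster
-- what changed: B drops the temp stack and inner pop-loop entirely: it tracks only the start boundary of the current marked run and emits each run-plus-terminator as one reversed consecutive range, with membership via a prebuilt set instead of A's per-step list scan.
import Mathlib
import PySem

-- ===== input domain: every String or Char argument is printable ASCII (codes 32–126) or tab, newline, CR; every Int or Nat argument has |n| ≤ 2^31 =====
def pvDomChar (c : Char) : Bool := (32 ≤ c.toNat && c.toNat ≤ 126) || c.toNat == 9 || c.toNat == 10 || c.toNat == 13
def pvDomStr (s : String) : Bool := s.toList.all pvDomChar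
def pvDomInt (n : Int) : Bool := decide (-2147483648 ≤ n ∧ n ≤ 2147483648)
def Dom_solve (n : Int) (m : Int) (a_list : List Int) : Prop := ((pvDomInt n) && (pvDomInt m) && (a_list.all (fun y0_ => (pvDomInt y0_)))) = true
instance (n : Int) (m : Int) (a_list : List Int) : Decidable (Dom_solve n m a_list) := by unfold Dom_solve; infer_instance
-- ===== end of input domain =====

-- B replaces A's temp stack and inner pop-loop by a run-start boundary and one reversed
-- consecutive range per flushed block (simpler; membership via a prebuilt set).

-- ===== PORT A =====
-- 'while len(temp): res.append(temp.pop())': pop last element, append to res, repeat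
def drainA (res : List Int) (temp : List Int) : List Int :=
  match h : PySem.List.pop? temp (-1) with
  | none => res
  | some (x, rest) => drainA (res ++ [x]) rest
termination_by temp.length
decreasing_by
  have := PySem.List.length_of_pop?_eq_some temp h
  simp at this ⊢
  omega

def stepA (a_list : List Int) (st : List Int × List Int) (p : Int) : List Int × List Int :=
  if a_list.contains p then (st.1, st.2 ++ [p])
  else (drainA (st.1 ++ [p]) st.2, [])

def solve (n : Int) (m : Int) (a_list : List Int) : String :=
  PySem.Str.join " "
    ((((PySem.List.pyRange 1 (n + 1) 1).foldl (stepA a_list) ([], [])).1).map PySem.Int.toStr)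

-- ===== PORT B =====
def stepB (marked : PySem.Set Int) (st : List Int × Int) (p : Int) : List Int × Int :=
  if PySem.Set.contains marked p then st
  else (st.1 ++ PySem.List.pyRange p (st.2 - 1) (-1), p + 1)

def solve_alt (n : Int) (m : Int) (a_list : List Int) : String :=
  PySem.Str.join " "
    ((((PySem.List.pyRange 1 (n + 1) 1).foldl (stepB (PySem.Set.ofList a_list)) ([], 1)).1).map
      PySem.Int.toStr)

-- ===== PRECONDITION & SPEC =====
def Spec_solve (n : Int) (m : Int) (a_list : List Int) (out : String) : Prop := out = solve_alt n m a_list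
instance (n : Int) (m : Int) (a_list : List Int) (out : String) : Decidable (Spec_solve n m a_list out) := by unfold Spec_solve; infer_instance

-- ===== CLAIM (what is proved, stated in full; the proofs are below) =====
def Claim_equal_solve : Prop := ∀ (n : Int) (m : Int) (a_list : List Int), Dom_solve n m a_list → Spec_solve n m a_list (solve n m a_list)

-- ===== LEMMAS AND PROOFS =====

theorem drainA_eq (temp : List Int) : ∀ res, drainA res temp = res ++ temp.reverse := by
  induction temp using List.reverseRecOn with
  | nil =>
    intro res
    unfold drainA
    split
    next => simp
    next y ys h => simp [PySem.List.pop?, PySem.List.pyIdx?] at h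
  | append_singleton t x ih =>
    intro res
    have hp : PySem.List.pop? (t ++ [x]) (-1) = some (x, t) := PySem.List.pop?_last t x
    unfold drainA
    split
    next h => rw [hp] at h; cases h
    next y ys h =>
      rw [hp] at h
      cases h
      rw [ih]
      simp

theorem contains_ofList (a_list : List Int) (p : Int) :
    PySem.Set.contains (PySem.Set.ofList a_list) p = a_list.contains p := by
  by_cases h : p ∈ a_list <;>
    simp [PySem.Set.contains_eq_listContains, PySem.Set.mem_ofList, h]

theorem loop_eq (a_list : List Int) (k : Nat) :
    ∀ (p s : Int) (res : List Int), s ≤ p →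
      ((PySem.List.pyRange p (p + k) 1).foldl (stepA a_list)
        (res, PySem.List.pyRange s p 1)).1
      = ((PySem.List.pyRange p (p + k) 1).foldl (stepB (PySem.Set.ofList a_list))
        (res, s)).1 := by
  induction k with
  | zero =>
    intro p s res _
    have h0 : PySem.List.pyRange p (p + ((0 : Nat) : Int)) 1 = [] :=
      PySem.List.pyRange_one_eq_nil (by omega)
    rw [h0]
    rfl
  | succ k ih =>
    intro p s res hsp
    rw [PySem.List.pyRange_one_cons (by omega : p < p + (k + 1 : Nat))]
    have harg : p + (k + 1 : Nat) = (p + 1) + k := by push_cast; ring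
    rw [harg]
    simp only [List.foldl_cons]
    by_cases hm : p ∈ a_list
    · rw [show stepA a_list (res, PySem.List.pyRange s p 1) p
            = (res, PySem.List.pyRange s p 1 ++ [p]) by simp [stepA, hm]]
      rw [show stepB (PySem.Set.ofList a_list) (res, s) p = (res, s) by
            simp [stepB, contains_ofList, hm]]
      rw [← PySem.List.pyRange_one_succ_right hsp]
      exact ih (p + 1) s res (by omega)
    · rw [show stepA a_list (res, PySem.List.pyRange s p 1) p
            = (drainA (res ++ [p]) (PySem.List.pyRange s p 1), []) by simp [stepA, hm]]
      rw [show stepB (PySem.Set.ofList a_list) (res, s) p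
            = (res ++ PySem.List.pyRange p (s - 1) (-1), p + 1) by
            simp [stepB, contains_ofList, hm]]
      have hrev : res ++ PySem.List.pyRange p (s - 1) (-1)
          = drainA (res ++ [p]) (PySem.List.pyRange s p 1) := by
        rw [drainA_eq, PySem.List.pyRange_neg_one_eq_reverse]
        have : (s - 1) + 1 = s := by ring
        rw [this, PySem.List.pyRange_one_succ_right hsp]
        simp
      rw [hrev]
      have hnil : ([] : List Int) = PySem.List.pyRange (p + 1) (p + 1) 1 := by
        rw [PySem.List.pyRange_one_eq_nil (by omega)]
      rw [hnil]
      exact ih (p + 1) (p + 1) _ (by omega)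

-- ===== VERDICT (by name: the statement is the Claim_ definition above) =====
theorem solve_spec : Claim_equal_solve := by
  intro n m a_list _
  unfold Spec_solve solve solve_alt
  by_cases hn : 0 ≤ n
  · have hk : n + 1 = 1 + ((n.toNat : Nat) : Int) := by omega
    have key := loop_eq a_list n.toNat 1 1 [] (le_refl 1)
    rw [PySem.List.pyRange_one_eq_nil (le_refl (1 : Int))] at key
    rw [hk, key]
  · rw [PySem.List.pyRange_one_eq_nil (by omega : n + 1 ≤ 1)]
    rfl
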